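-- pv_equiv track=rewrite | github.com/juntaic7/MDS-Test-Time-Scale | utils.py | parse_ReIFE_prompt
-- ===== SOURCE A (Python) =====
-- def parse_ReIFE_prompt(content: str) -> tuple[str, str]:
--     """
--     Parse a ReIFE prompt string into system message and user instruction.
--
--     Args:
--         content (str): The full prompt content with <|im_start|> and <|im_end|> tags
--
--     Returns:
--         tuple[str, str]: (system_message, user_instruction)
--     """
--     # Split into sections based on <|im_start|> tag
--     sections = content.split("<|im_start|>")
--     parsed_data = {}
--
--     # Parse each section
--     for section in sections:
--         if "<|im_end|>" in section:
--             # Split section into role and content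
--             role_and_content = section.split("\n", 1)
--             if len(role_and_content) == 2:
--                 role = role_and_content[0].strip()
--                 # Remove the <|im_end|> tag and strip whitespace
--                 content = role_and_content[1].split("<|im_end|>")[0].strip()
--                 parsed_data[role] = content
--
--     # Get system message and user instruction
--     system_msg = parsed_data.get("system", "")
--     user_msg = parsed_data.get("user", "")
--
--     return system_msg, user_msg
-- ===== SOURCE B (Python) =====
-- def parse_ReIFE_prompt(content: str) -> tuple[str, str]:
--     """Scan the <|im_start|> sections from the back and return the first
--     (i.e. last-written) message for each role, instead of building a dict."""
--     END = "<|im_end|>"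
--     def last_message(role: str) -> str:
--         for section in reversed(content.split("<|im_start|>")):
--             parts = section.split("\n", 1)
--             if len(parts) == 2 and parts[0].strip() == role and END in section:
--                 return parts[1].split(END)[0].strip()
--         return ""
--     return last_message("system"), last_message("user")
-- ===== Notes on version B (the rewrite author's own statement) =====
-- stated objective: alternative
-- what changed: Instead of one forward pass that accumulates every role in a dict and two lookups at the end, B scans the <|im_start|> sections backwards once per wanted role and returns the first match (last-written wins), with no dict.
import Mathlib
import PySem

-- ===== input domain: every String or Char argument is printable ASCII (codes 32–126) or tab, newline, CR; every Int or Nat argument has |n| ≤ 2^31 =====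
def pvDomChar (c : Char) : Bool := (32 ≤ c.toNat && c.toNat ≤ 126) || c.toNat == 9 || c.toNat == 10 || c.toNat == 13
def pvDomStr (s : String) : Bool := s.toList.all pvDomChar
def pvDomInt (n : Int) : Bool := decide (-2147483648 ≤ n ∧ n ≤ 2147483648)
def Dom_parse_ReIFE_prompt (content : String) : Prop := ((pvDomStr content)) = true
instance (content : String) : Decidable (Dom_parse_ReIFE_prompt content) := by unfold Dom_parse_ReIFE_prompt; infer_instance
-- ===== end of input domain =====

-- B replaces A's forward loop that accumulates every role in a dict with a
-- backward scan per role that returns the first (= last-written) match; same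
-- return value everywhere (objective: alternative, no speed claim).

-- ===== PORT A =====
-- loop body of A's 'for section in sections'
def pvStepA (d : PySem.Dict String String) (sec : String) : PySem.Dict String String :=
  if PySem.Str.isIn "<|im_end|>" sec then
    let rc := (PySem.Str.splitMax? sec "\n" 1).getD []
    if rc.length == 2 then
      let role := PySem.Str.strip (rc.headD "")
      let body := PySem.Str.strip (((PySem.Str.split? (rc.getD 1 "") "<|im_end|>").getD []).headD "")
      d.insert role body
    else d
  else d

def parse_ReIFE_prompt (content : String) : String × String :=
  let sections := (PySem.Str.split? content "<|im_start|>").getD []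
  let parsed := sections.foldl pvStepA PySem.Dict.empty
  (parsed.getD "system" "", parsed.getD "user" "")

-- ===== PORT B =====
-- B's inner loop 'for section in reversed(sections)' with early return
def pvLastMessage (role : String) : List String → String
  | [] => ""
  | sec :: rest =>
    let parts := (PySem.Str.splitMax? sec "\n" 1).getD []
    if parts.length == 2 && PySem.Str.strip (parts.headD "") == role
        && PySem.Str.isIn "<|im_end|>" sec then
      PySem.Str.strip (((PySem.Str.split? (parts.getD 1 "") "<|im_end|>").getD []).headD "")
    else pvLastMessage role rest

def parse_ReIFE_prompt_alt (content : String) : String × String :=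
  let sections := ((PySem.Str.split? content "<|im_start|>").getD []).reverse
  (pvLastMessage "system" sections, pvLastMessage "user" sections)

-- ===== PRECONDITION & SPEC =====
def Spec_parse_ReIFE_prompt (content : String) (out : String × String) : Prop := out = parse_ReIFE_prompt_alt content
instance (content : String) (out : String × String) : Decidable (Spec_parse_ReIFE_prompt content out) := by unfold Spec_parse_ReIFE_prompt; infer_instance

-- ===== CLAIM (what is proved, stated in full; the proofs are below) =====
def Claim_equal_parse_ReIFE_prompt : Prop := ∀ (content : String), Dom_parse_ReIFE_prompt content → Spec_parse_ReIFE_prompt content (parse_ReIFE_prompt content)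

-- ===== LEMMAS AND PROOFS =====

-- abbreviations for the pieces both loop bodies compute from a section
def pvHasNL (sec : String) : Bool := ((PySem.Str.splitMax? sec "\n" 1).getD []).length == 2
def pvKey (sec : String) : String := PySem.Str.strip (((PySem.Str.splitMax? sec "\n" 1).getD []).headD "")
def pvVal (sec : String) : String :=
  PySem.Str.strip (((PySem.Str.split? (((PySem.Str.splitMax? sec "\n" 1).getD []).getD 1 "") "<|im_end|>").getD []).headD "")

lemma pvStepA_eq (d : PySem.Dict String String) (sec : String) :
    pvStepA d sec =
      if PySem.Str.isIn "<|im_end|>" sec && pvHasNL sec then d.insert (pvKey sec) (pvVal sec)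
      else d := by
  unfold pvStepA pvHasNL pvKey pvVal
  cases h1 : PySem.Str.isIn "<|im_end|>" sec <;>
    cases h2 : (((PySem.Str.splitMax? sec "\n" 1).getD []).length == 2) <;>
      simp [h2]

-- option-valued version of pvLastMessage (none = loop fell through)
def pvFindMsg (role : String) : List String → Option String
  | [] => none
  | sec :: rest =>
    if pvHasNL sec && pvKey sec == role && PySem.Str.isIn "<|im_end|>" sec then some (pvVal sec)
    else pvFindMsg role rest

lemma pvLastMessage_eq_find (role : String) (l : List String) :
    pvLastMessage role l = (pvFindMsg role l).getD "" := by
  induction l with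
  | nil => rfl
  | cons sec rest ih =>
    show (if pvHasNL sec && pvKey sec == role && PySem.Str.isIn "<|im_end|>" sec then pvVal sec
          else pvLastMessage role rest) = _
    rw [pvFindMsg]
    split <;> simp [ih]

set_option maxHeartbeats 800000 in
lemma getD_foldl_stepA (role : String) (l : List String) (d : PySem.Dict String String) :
    (l.foldl pvStepA d).getD role "" = (pvFindMsg role l.reverse).getD (d.getD role "") := by
  induction l using List.reverseRecOn generalizing d with
  | nil => rfl
  | append_singleton l x ih =>
    rw [List.foldl_append, List.reverse_append]
    simp only [List.foldl_cons, List.foldl_nil, List.reverse_singleton, List.singleton_append,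
      pvFindMsg, pvStepA_eq]
    cases hIn : PySem.Str.isIn "<|im_end|>" x with
    | false => simp only [Bool.and_false, Bool.false_and]; exact ih d
    | true =>
      cases hNL : pvHasNL x with
      | false => simp only [Bool.and_false, Bool.false_and]; exact ih d
      | true =>
        cases hK : pvKey x == role with
        | true =>
          simp only [Bool.and_self, if_true, Option.getD_some]
          rw [← eq_of_beq hK]
          exact PySem.Dict.getD_insert_self _ _ _ _
        | false =>
          simp only [Bool.and_self, Bool.true_and, Bool.false_and, if_true]
          rw [PySem.Dict.getD_insert_of_ne]
          · exact ih d
          · intro h; rw [h] at hK; simp at hK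

-- ===== VERDICT (by name: the statement is the Claim_ definition above) =====
theorem parse_ReIFE_prompt_spec : Claim_equal_parse_ReIFE_prompt := by
  intro content _
  show _ = _
  simp only [parse_ReIFE_prompt, parse_ReIFE_prompt_alt, pvLastMessage_eq_find,
    getD_foldl_stepA, PySem.Dict.getD_empty]
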